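-- pv_equiv track=rewrite | github.com/santicr/Competitive-Programming | Google/p4l3.py | solution
-- ===== SOURCE A (Python) =====
-- def solution(x, y):
-- 	lista = [int(x), int(y)]
-- 	x = max(lista)
-- 	y = min(lista)
-- 	ans = -1
-- 	t = int()
--
-- 	if(x % y == 0 and y != 1):
-- 		ans = "impossible"
-- 	else:
-- 		while(y > 0):
-- 			ans += x // y
-- 			t = y
-- 			y = x % y
-- 			x = t
-- 		if(x != 1):
-- 			ans = "impossible"
--
-- 	return str(ans)
-- ===== SOURCE B (Python) =====
-- def solution(x, y):
--     def rec(a, b, acc):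
--         if b == 0:
--             return a, acc
--         return rec(b, a % b, acc + a // b)
--     g, acc = rec(max(x, y), min(x, y), -1)
--     return str(acc) if g == 1 else "impossible"
-- ===== Notes on version B (the rewrite author's own statement) =====
-- stated objective: simpler
-- what changed: Replaces the mutable while-loop plus A's separate divisibility pre-check by a single recursive Euclidean helper that returns (gcd, quotient sum); the pre-check is proved redundant for positive minima and dropped.
-- intended difference: On inputs with min<0, max=1 and min!=-1, A skips its loop and returns the leftover accumulator '-1', which is never a valid quotient sum; B returns 'impossible', matching A's own answer on every other negative-minimum input, which is the intended value. — e.g. on solution(1, -2): A returns "-1", B returns "impossible"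
import Mathlib
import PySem

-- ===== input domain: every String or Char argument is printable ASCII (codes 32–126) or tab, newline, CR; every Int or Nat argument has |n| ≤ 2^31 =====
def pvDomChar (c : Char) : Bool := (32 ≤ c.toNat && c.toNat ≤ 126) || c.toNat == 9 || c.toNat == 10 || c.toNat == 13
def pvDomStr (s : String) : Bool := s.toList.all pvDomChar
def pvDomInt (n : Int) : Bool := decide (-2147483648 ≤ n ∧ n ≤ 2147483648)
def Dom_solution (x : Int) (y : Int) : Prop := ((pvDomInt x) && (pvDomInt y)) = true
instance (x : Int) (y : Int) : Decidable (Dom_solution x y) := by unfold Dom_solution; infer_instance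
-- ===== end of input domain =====

-- B drops A's redundant divisibility pre-check and replaces the while loop by a
-- recursive Euclidean helper returning (gcd, sum of quotients); objective: simpler.

-- ===== PORT A =====
-- the while loop: state (x, y, ans); returns final (x, ans).
-- fuel is only a totality guard: y strictly decreases while positive, so y.toNat + 1 always suffices.
def solutionLoop : Nat → Int → Int → Int → Int × Int
  | 0, x, _, ans => (x, ans)
  | Nat.succ fuel, x, y, ans =>
      if 0 < y then solutionLoop fuel y (PySem.Int.mod x y) (ans + PySem.Int.floordiv x y)
      else (x, ans)

def solution (x : Int) (y : Int) : String :=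
  let X := max x y
  let Y := min x y
  if PySem.Int.mod X Y = 0 ∧ Y ≠ 1 then "impossible"
  else
    let p := solutionLoop (Y.toNat + 1) X Y (-1)
    if p.1 ≠ 1 then "impossible" else PySem.Int.toStr p.2

-- ===== PORT B =====
-- rec(a, b, acc): Euclidean reduction, returns (gcd value, accumulated quotient sum).
-- fuel is only a totality guard: |b| strictly decreases, so b.natAbs + 1 always suffices.
def solutionRec : Nat → Int → Int → Int → Int × Int
  | 0, a, _, acc => (a, acc)
  | Nat.succ fuel, a, b, acc =>
      if b = 0 then (a, acc)
      else solutionRec fuel b (PySem.Int.mod a b) (acc + PySem.Int.floordiv a b)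

def solution_alt (x : Int) (y : Int) : String :=
  let p := solutionRec ((min x y).natAbs + 1) (max x y) (min x y) (-1)
  if p.1 = 1 then PySem.Int.toStr p.2 else "impossible"

-- ===== PRECONDITION & SPEC =====
-- Pre_ excludes only min x y = 0, where A raises ZeroDivisionError at `x % y`.
def Pre_solution (x : Int) (y : Int) : Prop := min x y ≠ 0
instance (x : Int) (y : Int) : Decidable (Pre_solution x y) := by unfold Pre_solution; infer_instance
def pvWitness_solution : Int × Int := (10, 4)

-- On inputs with min x y < 0, max x y = 1 and min x y ≠ -1, A skips its loop and returns the
-- leftover accumulator "-1", which is never a valid quotient sum; B returns "impossible",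
-- as A itself does on every other input with a negative minimum, which is the intended value.
def D_solution (x : Int) (y : Int) : Prop := min x y < 0 ∧ max x y = 1 ∧ min x y ≠ -1
instance (x : Int) (y : Int) : Decidable (D_solution x y) := by unfold D_solution; infer_instance

def Spec_solution (x : Int) (y : Int) (out : String) : Prop := ¬ D_solution x y → out = solution_alt x y
instance (x : Int) (y : Int) (out : String) : Decidable (Spec_solution x y out) := by unfold Spec_solution; infer_instance

def pvDiffWitness_solution : Int × Int := (1, -2)
def pvDiffWitnessOut_solution : String × String := ("-1", "impossible")

-- ===== CLAIM (what is proved, stated in full; the proofs are below) =====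
def Claim_unchanged_solution : Prop := ∀ (x : Int) (y : Int), Dom_solution x y → Pre_solution x y → Spec_solution x y (solution x y)
def Claim_changed_solution : Prop := Dom_solution (pvDiffWitness_solution.1) (pvDiffWitness_solution.2) ∧ Pre_solution (pvDiffWitness_solution.1) (pvDiffWitness_solution.2) ∧ D_solution (pvDiffWitness_solution.1) (pvDiffWitness_solution.2) ∧ solution (pvDiffWitness_solution.1) (pvDiffWitness_solution.2) = pvDiffWitnessOut_solution.1 ∧ solution_alt (pvDiffWitness_solution.1) (pvDiffWitness_solution.2) = pvDiffWitnessOut_solution.2 ∧ pvDiffWitnessOut_solution.1 ≠ pvDiffWitnessOut_solution.2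
def Claim_exact_solution : Prop := ∀ (x : Int) (y : Int), Dom_solution x y → Pre_solution x y → D_solution x y → solution x y ≠ solution_alt x y

-- ===== LEMMAS AND PROOFS =====

-- the recursion ignores a zero divisor whatever the fuel
theorem rec_zero (f : Nat) (a acc : Int) : solutionRec f a 0 acc = (a, acc) := by
  cases f <;> simp [solutionRec]

-- with sufficient fuel, for nonnegative y the while loop and the recursion coincide
theorem loop_eq_rec : ∀ (f : Nat) (x y ans : Int), 0 ≤ y → y.toNat < f →
    solutionLoop f x y ans = solutionRec f x y ans := by
  intro f
  induction f with
  | zero => intro x y ans _ hf; omega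
  | succ f ih =>
    intro x y ans hy _
    by_cases h0 : 0 < y
    · have hne : y ≠ 0 := by omega
      have h1 := PySem.Int.mod_nonneg x h0
      have h2 := PySem.Int.mod_lt x h0
      simp only [solutionLoop, solutionRec, h0, if_pos, hne, if_neg, not_false_iff]
      exact ih _ _ _ h1 (by omega)
    · have hz : y = 0 := by omega
      simp [solutionLoop, hz, rec_zero]

-- with sufficient fuel, for negative b the recursion ends on a negative gcd value
theorem rec_neg : ∀ (f : Nat) (a b acc : Int), b < 0 → b.natAbs < f →
    (solutionRec f a b acc).1 < 0 := by
  intro f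
  induction f with
  | zero => intro a b acc _ hf; omega
  | succ f ih =>
    intro a b acc hb hf
    have hne : b ≠ 0 := by omega
    simp only [solutionRec, hne, if_neg, not_false_iff]
    have hbd := PySem.Int.mod_neg_bounds a hb
    by_cases h0 : PySem.Int.mod a b = 0
    · rw [h0, rec_zero]; exact hb
    · exact ih b _ _ (by omega) (by omega)

-- a negative divisor of 1 must be -1
theorem neg_dvd_one {Y : Int} (h : Y ∣ 1) (hneg : Y < 0) : Y = -1 := by
  rcases Int.isUnit_iff.mp (isUnit_of_dvd_one h) with h1 | h1 <;> omega

-- ===== VERDICT (by name: the statement is the Claim_ definition above) =====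
theorem solution_spec : Claim_unchanged_solution := by
  intro x y _ hpre hnd
  show solution x y = solution_alt x y
  simp only [solution, solution_alt]
  rcases lt_or_gt_of_ne hpre with hY | hY
  · -- negative minimum, outside D_
    have hrec := rec_neg ((min x y).natAbs + 1) (max x y) (min x y) (-1) hY (by omega)
    have hrne : (solutionRec ((min x y).natAbs + 1) (max x y) (min x y) (-1)).1 ≠ 1 := by omega
    by_cases hsc : PySem.Int.mod (max x y) (min x y) = 0 ∧ min x y ≠ 1
    · simp [hsc, hrne]
    · have hX : max x y ≠ 1 := by
        intro hX1
        rcases (by unfold D_solution at hnd; tauto :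
            ¬ (max x y = 1) ∨ min x y = -1) with h | h
        · exact h hX1
        · exact hsc ⟨by rw [hX1, h]; decide, by omega⟩
      simp [solutionLoop, hsc, not_lt.mpr (le_of_lt hY), hX, hrne]
  · -- positive minimum: A = B everywhere
    by_cases hsc : PySem.Int.mod (max x y) (min x y) = 0 ∧ min x y ≠ 1
    · -- A's pre-check fires; B's recursion reaches gcd = min x y ≠ 1 as well
      have hne : min x y ≠ 0 := by omega
      have hstep : solutionRec ((min x y).natAbs + 1) (max x y) (min x y) (-1) =
          (min x y, -1 + PySem.Int.floordiv (max x y) (min x y)) := by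
        simp only [solutionRec, hne, if_neg, not_false_iff, hsc.1, rec_zero]
      simp [hsc, hstep]
    · simp only [hsc, if_false]
      have hfuel : (min x y).toNat < (min x y).toNat + 1 := by omega
      have htn : ((min x y).natAbs + 1) = ((min x y).toNat + 1) := by omega
      rw [htn, loop_eq_rec _ _ _ _ (le_of_lt hY) hfuel]
      by_cases hg : (solutionRec ((min x y).toNat + 1) (max x y) (min x y) (-1)).1 = 1 <;> simp [hg]

theorem solution_changed : Claim_changed_solution := by
  unfold Claim_changed_solution; decide

theorem solution_tight : Claim_exact_solution := by
  intro x y _ hpre hd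
  obtain ⟨hY, hX, hYne⟩ : min x y < 0 ∧ max x y = 1 ∧ min x y ≠ -1 := hd
  have hrec := rec_neg ((min x y).natAbs + 1) (max x y) (min x y) (-1) hY (by omega)
  have hrne : (solutionRec ((min x y).natAbs + 1) (max x y) (min x y) (-1)).1 ≠ 1 := by omega
  have hmod : PySem.Int.mod (max x y) (min x y) ≠ 0 := by
    intro h
    rw [PySem.Int.mod_eq_zero_iff_dvd, hX] at h
    exact hYne (neg_dvd_one h hY)
  simp only [solution, solution_alt]
  rw [hX] at hrne hmod ⊢
  simp [solutionLoop, hmod, not_lt.mpr (le_of_lt hY), hrne]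
  decide
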